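-- pv_equiv track=rewrite | github.com/collinsakenga/codewars_solutions | 6 kyu/6 kyu_Loneliest character.py | loneliest
-- ===== SOURCE A (Python) =====
-- def loneliest(strng):
--     s=strng.strip()
--     letter=[]
--     comp=0
--     for i,j in enumerate(s):
--         if j==" ":
--             continue
--         index1=index2=i
--         space_left=space_right=0
--         while (index1-1)>=0 and s[index1-1]==" ":
--             space_left+=1
--             index1-=1
--         while (index2+1)<len(s) and s[index2+1]==" ":
--             space_right+=1
--             index2+=1
--         if (space_left+space_right)==comp:
--             letter.append(j)
--         elif (space_left+space_right)>comp:
--             comp=space_left+space_right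
--             letter=[j]
--     return letter
-- ===== SOURCE B (Python) =====
-- def loneliest(strng):
--     s = strng.strip()
--     left = []
--     run = 0
--     for c in s:
--         left.append(run)
--         run = run + 1 if c == " " else 0
--     right = []
--     run = 0
--     for c in reversed(s):
--         right.append(run)
--         run = run + 1 if c == " " else 0
--     right.reverse()
--     scored = [(c, l + r) for c, l, r in zip(s, left, right) if c != " "]
--     if not scored:
--         return []
--     m = max(sc for _, sc in scored)
--     return [c for c, sc in scored if sc == m]
-- ===== Notes on version B (the rewrite author's own statement) =====
-- stated objective: simpler
-- what changed: Replaced the per-letter while-loop scans for neighbouring spaces and the running-max/reset accumulator by two linear passes that build left/right space-run tables, a single max over the scored letters, and an order-preserving filter.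
import Mathlib
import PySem

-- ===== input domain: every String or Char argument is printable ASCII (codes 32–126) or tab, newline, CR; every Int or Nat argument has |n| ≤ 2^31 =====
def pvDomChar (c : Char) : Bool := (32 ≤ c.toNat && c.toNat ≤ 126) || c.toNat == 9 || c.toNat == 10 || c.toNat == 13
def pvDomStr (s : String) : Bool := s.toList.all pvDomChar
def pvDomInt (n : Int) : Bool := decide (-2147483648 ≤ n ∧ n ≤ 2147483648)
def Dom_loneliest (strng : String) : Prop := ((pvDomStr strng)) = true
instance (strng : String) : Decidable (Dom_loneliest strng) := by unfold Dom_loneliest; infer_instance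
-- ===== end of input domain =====

-- B replaces A's per-letter while-loop space scans and running-max state by two linear passes
-- building left/right space tables, then a max over the scored letters and an order-preserving
-- filter (objective: simpler).

-- ===== PORT A =====
-- 'while (index1-1)>=0 and s[index1-1]==" "': structural recursion on the index.
-- 's.getD k 'x' = ' '' holds iff k is in range and s[k] is a space ('x' is a non-space default).
def pvCountLeft (s : List Char) : Nat → Nat
  | 0 => 0
  | k + 1 => if s.getD k 'x' = ' ' then pvCountLeft s k + 1 else 0

-- 'while (index2+1)<len(s) and s[index2+1]==" "'
def pvCountRight (s : List Char) (i : Nat) : Nat :=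
  if h : i + 1 < s.length ∧ s.getD (i + 1) 'x' = ' ' then pvCountRight s (i + 1) + 1 else 0
termination_by s.length - i
decreasing_by omega

def loneliest (strng : String) : List String :=
  let s := (PySem.Str.strip strng).toList
  -- for i,j in enumerate(s): skip spaces; else compare space_left+space_right with comp.
  -- ij.1 is the enumerate index, always ≥ 0, so .toNat is exact here.
  ((PySem.List.enumerate s).foldl (fun (st : Nat × List String) ij =>
      if ij.2 = ' ' then st
      else
        let sc := pvCountLeft s ij.1.toNat + pvCountRight s ij.1.toNat
        if sc = st.1 then (st.1, st.2 ++ [String.ofList [ij.2]])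
        else if sc > st.1 then (sc, [String.ofList [ij.2]])
        else st) (0, [])).2

-- ===== PORT B =====
-- one forward/backward pass step: append the current run, then update it
def pvRunStep (st : Nat × List Nat) (c : Char) : Nat × List Nat :=
  (if c = ' ' then st.1 + 1 else 0, st.2 ++ [st.1])

def loneliest_alt (strng : String) : List String :=
  let s := (PySem.Str.strip strng).toList
  let left := (s.foldl pvRunStep (0, [])).2
  let right := ((s.reverse.foldl pvRunStep (0, [])).2).reverse
  let scored := (s.zip (left.zip right)).filterMap
      (fun p => if p.1 = ' ' then none else some (p.1, p.2.1 + p.2.2))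
  if scored.isEmpty then []
  else
    -- m = max(sc for _, sc in scored); scored is nonempty here, getD 0 is never used
    let m := (PySem.List.max? (scored.map Prod.snd) (fun y => y)).getD 0
    (scored.filter (fun p => p.2 == m)).map (fun p => String.ofList [p.1])

-- ===== PRECONDITION & SPEC =====
def Spec_loneliest (strng : String) (out : List String) : Prop := out = loneliest_alt strng
instance (strng : String) (out : List String) : Decidable (Spec_loneliest strng out) := by unfold Spec_loneliest; infer_instance

-- ===== CLAIM (what is proved, stated in full; the proofs are below) =====
def Claim_equal_loneliest : Prop := ∀ (strng : String), Dom_loneliest strng → Spec_loneliest strng (loneliest strng)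

-- ===== LEMMAS AND PROOFS =====

-- the score of position k
def pvScore (s : List Char) (k : Nat) : Nat := pvCountLeft s k + pvCountRight s k

-- the common intermediate: the letters of s in order, each with its score
def pvCanon (s : List Char) : List (Char × Nat) :=
  (List.range s.length).filterMap
    (fun k => if s.getD k 'x' = ' ' then none else some (s.getD k 'x', pvScore s k))

-- running maximum of the scores (0 when empty)
def pvM (l : List (Char × Nat)) : Nat := l.foldl (fun a p => max a p.2) 0

theorem pv_le_M (l : List (Char × Nat)) (p : Char × Nat) (hp : p ∈ l) : p.2 ≤ pvM l := by
  have h : pvM l = List.foldl max 0 (l.map Prod.snd) := by simp [pvM, List.foldl_map]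
  rw [h]
  exact (PySem.List.le_foldl_max (l.map Prod.snd) 0).2 p.2 (List.mem_map_of_mem hp)

-- A's running-max fold over any (char, score) list returns the filter-by-maximum
theorem pvFoldA (l : List (Char × Nat)) :
    l.foldl (fun (st : Nat × List String) p =>
        if p.2 = st.1 then (st.1, st.2 ++ [String.ofList [p.1]])
        else if p.2 > st.1 then (p.2, [String.ofList [p.1]])
        else st) (0, [])
      = (pvM l, (l.filter (fun p => p.2 == pvM l)).map (fun p => String.ofList [p.1])) := by
  induction l using List.reverseRecOn with
  | nil => simp [pvM]
  | append_singleton t x ih =>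
      have hM : pvM (t ++ [x]) = max (pvM t) x.2 := by simp [pvM, List.foldl_append]
      rw [List.foldl_append, ih, List.foldl_cons, List.foldl_nil]
      rcases lt_trichotomy x.2 (pvM t) with hlt | heq | hgt
      · have h1 : ¬ x.2 = pvM t := by omega
        have h2 : ¬ x.2 > pvM t := by omega
        simp only [h1, if_false, h2]
        rw [hM, max_eq_left (le_of_lt hlt)]
        simp [List.filter_append, h1]
      · simp only [heq, if_true, hM]
        simp [List.filter_append, heq]
      · have h1 : ¬ x.2 = pvM t := by omega
        simp only [h1, if_false, hgt, if_true]
        rw [hM, max_eq_right (le_of_lt hgt)]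
        have hnil : t.filter (fun p => p.2 == x.2) = [] := by
          rw [List.filter_eq_nil_iff]
          intro p hp
          have := pv_le_M t p hp
          simp only [beq_iff_eq]
          omega
        simp [List.filter_append, hnil]

theorem pvM_cons (c0 : Char × Nat) (t : List (Char × Nat)) :
    pvM (c0 :: t) = List.foldl max c0.2 (t.map Prod.snd) := by
  simp [pvM, List.foldl_map]

theorem pvCountLeft_append (s : List Char) (c : Char) (k : Nat) (hk : k ≤ s.length) :
    pvCountLeft (s ++ [c]) k = pvCountLeft s k := by
  induction k with
  | zero => rfl
  | succ k ih =>
      have hk' : k < s.length := by omega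
      simp only [pvCountLeft, List.getD_append _ _ _ _ hk', ih (by omega)]

theorem pvLeftFold (s : List Char) :
    s.foldl pvRunStep (0, []) = (pvCountLeft s s.length, (List.range s.length).map (pvCountLeft s)) := by
  induction s using List.reverseRecOn with
  | nil => simp [pvCountLeft]
  | append_singleton t c ih =>
      rw [List.foldl_append, ih, List.foldl_cons, List.foldl_nil]
      have hlen : (t ++ [c]).length = t.length + 1 := by simp
      have hfst : pvCountLeft (t ++ [c]) (t.length + 1)
          = if c = ' ' then pvCountLeft t t.length + 1 else 0 := by
        have hget : (t ++ [c]).getD t.length 'x' = c := by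
          simp [List.getD_eq_getElem?_getD]
        simp only [pvCountLeft, hget, pvCountLeft_append t c t.length (le_refl _)]
      have hmap : (List.range (t.length + 1)).map (pvCountLeft (t ++ [c]))
          = (List.range t.length).map (pvCountLeft t) ++ [pvCountLeft t t.length] := by
        rw [List.range_succ, List.map_append]
        congr 1
        · apply List.map_congr_left
          intro k hk
          exact pvCountLeft_append t c k (le_of_lt (List.mem_range.mp hk))
        · simp [pvCountLeft_append t c t.length (le_refl _)]
      rw [hlen, hfst, hmap]
      rfl

theorem pvGetD_reverse (s : List Char) (k : Nat) (hk : k < s.length) (d : Char) :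
    s.reverse.getD k d = s.getD (s.length - 1 - k) d := by
  rw [List.getD_eq_getElem?_getD, List.getD_eq_getElem?_getD,
    List.getElem?_reverse (by simpa using hk)]

theorem pvRight_eq_left_rev (s : List Char) (i : Nat) (hi : i < s.length) :
    pvCountRight s i = pvCountLeft s.reverse (s.length - 1 - i) := by
  rw [pvCountRight]
  by_cases h : i + 1 < s.length ∧ s.getD (i + 1) 'x' = ' '
  · have h1 : s.length - 1 - i = (s.length - 1 - (i + 1)) + 1 := by omega
    rw [dif_pos h, h1]
    have hrev : s.reverse.getD (s.length - 1 - (i + 1)) 'x' = s.getD (i + 1) 'x' := by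
      rw [pvGetD_reverse s _ (by omega) 'x']
      congr 1
      omega
    rw [pvRight_eq_left_rev s (i + 1) h.1]
    simp only [pvCountLeft]
    rw [hrev, if_pos h.2]
  · rw [dif_neg h]
    by_cases hl : i + 1 < s.length
    · have h1 : s.length - 1 - i = (s.length - 1 - (i + 1)) + 1 := by omega
      have hrev : s.reverse.getD (s.length - 1 - (i + 1)) 'x' = s.getD (i + 1) 'x' := by
        rw [pvGetD_reverse s _ (by omega) 'x']
        congr 1
        omega
      have hne : ¬ s.getD (i + 1) 'x' = ' ' := fun hc => h ⟨hl, hc⟩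
      rw [h1]
      simp only [pvCountLeft]
      rw [hrev, if_neg hne]
    · have h1 : s.length - 1 - i = 0 := by omega
      rw [h1]
      rfl
termination_by s.length - i
decreasing_by omega

theorem pvRightTable (s : List Char) :
    ((s.reverse.foldl pvRunStep (0, [])).2).reverse = (List.range s.length).map (pvCountRight s) := by
  rw [pvLeftFold s.reverse]
  apply List.ext_getElem
  · simp
  · intro k h1 h2
    simp only [List.length_map, List.length_range, List.length_reverse] at h1 h2 ⊢
    rw [List.getElem_reverse]
    simp only [List.getElem_map, List.getElem_range, List.length_map, List.length_range]
    exact (pvRight_eq_left_rev s k (by simpa using h2)).symm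

theorem pvB_scored (s : List Char) :
    (s.zip (((s.foldl pvRunStep (0, [])).2).zip (((s.reverse.foldl pvRunStep (0, [])).2).reverse))).filterMap
      (fun p => if p.1 = ' ' then none else some (p.1, p.2.1 + p.2.2)) = pvCanon s := by
  rw [pvLeftFold, pvRightTable]
  have hzip : s.zip (((List.range s.length).map (pvCountLeft s)).zip
        ((List.range s.length).map (pvCountRight s)))
      = (List.range s.length).map (fun k => (s.getD k 'x', (pvCountLeft s k, pvCountRight s k))) := by
    apply List.ext_getElem
    · simp
    · intro k h1 h2
      simp only [List.length_map, List.length_range] at h2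
      rw [List.getElem_map]
      simp only [List.getElem_zip, List.getElem_map, List.getElem_range,
        List.getD_eq_getElem _ _ h2]
  rw [hzip, List.filterMap_map]
  rfl

theorem pvA_eq_canon (strng : String) :
    loneliest strng
      = ((pvCanon ((PySem.Str.strip strng).toList)).filter
          (fun p => p.2 == pvM (pvCanon ((PySem.Str.strip strng).toList)))).map
          (fun p => String.ofList [p.1]) := by
  have hres := pvFoldA (pvCanon ((PySem.Str.strip strng).toList))
  have h2 : ((pvCanon ((PySem.Str.strip strng).toList)).foldl (fun (st : Nat × List String) p =>
        if p.2 = st.1 then (st.1, st.2 ++ [String.ofList [p.1]])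
        else if p.2 > st.1 then (p.2, [String.ofList [p.1]])
        else st) (0, [])).2
      = ((pvCanon ((PySem.Str.strip strng).toList)).filter
          (fun p => p.2 == pvM (pvCanon ((PySem.Str.strip strng).toList)))).map
          (fun p => String.ofList [p.1]) := by rw [hres]
  rw [← h2]
  simp only [loneliest]
  rw [PySem.List.enumerate_eq_map_pyRange _ 'x', PySem.List.len_eq,
    PySem.List.pyRange_zero_natCast, List.foldl_map, List.foldl_map]
  unfold pvCanon
  rw [List.foldl_filterMap]
  refine congrArg Prod.snd (List.foldl_ext _ _ _ ?_)
  intro st k _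
  by_cases h : (PySem.Chars.strip strng.toList)[k]?.getD 'x' = ' '
  · simp [h, PySem.List.pyGetD_natCast]
  · simp [h, PySem.List.pyGetD_natCast, pvScore]

theorem pvAlt_eq_canon (strng : String) :
    loneliest_alt strng
      = ((pvCanon ((PySem.Str.strip strng).toList)).filter
          (fun p => p.2 == pvM (pvCanon ((PySem.Str.strip strng).toList)))).map
          (fun p => String.ofList [p.1]) := by
  simp only [loneliest_alt]
  rw [pvB_scored]
  generalize pvCanon ((PySem.Str.strip strng).toList) = l
  cases l with
  | nil => simp
  | cons c0 t =>
      simp only [List.isEmpty_cons, Bool.false_eq_true, if_false, List.map_cons,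
        PySem.List.max?_id_cons, Option.getD_some, pvM_cons]

-- ===== VERDICT (by name: the statement is the Claim_ definition above) =====
theorem loneliest_spec : Claim_equal_loneliest := by
  intro strng _
  unfold Spec_loneliest
  rw [pvA_eq_canon strng, pvAlt_eq_canon strng]
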